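-- pv_equiv track=rewrite | github.com/tkgaolol/brushcode_juejin | code/95.py | solution
-- ===== SOURCE A (Python) =====
-- def solution(n, k, inp):
--     left = 0
--     right = 0
--     max_length = 0
--     count = {}
--
--     while right < n:
--         if inp[right] not in count:
--             count[inp[right]] = 0
--         count[inp[right]] += 1
--
--         # Check if we need to modify characters
--         while len(count) > 2:
--             check = sum(sorted(count.values(), reverse=True)[2:])
--             if check <= k:
--                 break
--             count[inp[left]] -= 1
--             if count[inp[left]] == 0:
--                 del count[inp[left]]
--             left += 1
--
--         # Calculate the number of modifications needed
--         total_chars = right - left + 1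
--         max_count = max(count.values())
--         modifications_needed = total_chars - max_count
--
--         max_length = max(max_length, total_chars)
--
--         right += 1
--
--     return max_length
-- ===== SOURCE B (Python) =====
-- def solution(n, k, inp):
--     # Different algorithm: instead of one sliding window over a count dict with
--     # per-step sorting, enumerate the candidate pair (a, b) of characters kept
--     # unmodified; a window is feasible for (a, b) iff it holds at most
--     # max(k, 0) characters outside {a, b}, a plain integer counter.
--     s = inp[:n] if n > 0 else ""
--     kk = k if k > 0 else 0
--     chars = list(dict.fromkeys(s))
--     best = 0
--     for a in chars:
--         for b in chars:
--             left = 0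
--             others = 0
--             for right in range(len(s)):
--                 if s[right] != a and s[right] != b:
--                     others += 1
--                 while others > kk:
--                     if s[left] != a and s[left] != b:
--                         others -= 1
--                     left += 1
--                 if right - left + 1 > best:
--                     best = right - left + 1
--     return best
-- ===== Notes on version B (the rewrite author's own statement) =====
-- stated objective: alternative
-- what changed: A runs one sliding window over a character-count dict, re-sorting all counts at every shrink step to find the cost beyond the top-2; B enumerates the candidate pair (a,b) of characters kept unmodified and, for each pair, slides a window maintaining only one integer (the number of characters outside {a,b}), taking the best length over all pairs - no count dict, no sorting, no top-2 computation.
import Mathlib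
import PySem

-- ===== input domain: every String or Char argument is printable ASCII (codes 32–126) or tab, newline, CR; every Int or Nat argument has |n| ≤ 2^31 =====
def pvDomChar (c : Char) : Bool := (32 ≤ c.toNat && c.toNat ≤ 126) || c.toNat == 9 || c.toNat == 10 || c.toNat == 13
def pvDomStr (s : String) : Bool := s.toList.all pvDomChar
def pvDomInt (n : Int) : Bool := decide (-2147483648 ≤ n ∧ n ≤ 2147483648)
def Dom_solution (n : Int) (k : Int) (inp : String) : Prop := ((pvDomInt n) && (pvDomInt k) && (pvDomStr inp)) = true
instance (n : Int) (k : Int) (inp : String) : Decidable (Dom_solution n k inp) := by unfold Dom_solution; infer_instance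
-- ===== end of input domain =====

-- B replaces A's sliding window over a character-count dict (re-sorted at every
-- shrink step) by a different algorithm: it enumerates the candidate pair (a, b)
-- of characters kept unmodified and, per pair, slides a window maintaining one
-- integer counter. Equivalence of the RETURN value is proved below.

-- ===== PORT A =====
-- inner `while len(count) > 2:` loop of A; the Nat fuel only bounds the number of
-- shrink steps (each real step removes one character of the window, so a fuel of
-- sum(count.values()) is never exhausted); the `none` branches are Python's
-- IndexError/KeyError, unreachable in real runs.
def solutionInner (k : Int) (inp : String) :
    Nat → Int → PySem.Dict Char Int → Int × PySem.Dict Char Int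
  | 0, left, count => (left, count)
  | fuel + 1, left, count =>
    if 2 < count.size then
      -- check = sum(sorted(count.values(), reverse=True)[2:])
      let check := (PySem.List.slice (PySem.List.sorted count.values (fun v => v) true) (some 2) none).sum
      if check ≤ k then (left, count)
      else
        match PySem.Str.pyGet? inp left with
        | none => (left, count)      -- unreachable: IndexError
        | some ch =>
          match count.get? ch with
          | none => (left, count)    -- unreachable: KeyError on `count[inp[left]] -= 1`
          | some v =>
            let count1 := count.insert ch (v - 1)
            let count2 := if v - 1 == 0 then count1.erase ch else count1
            solutionInner k inp fuel (left + 1) count2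
    else (left, count)

-- outer `while right < n:` loop of A
def solutionLoop (n : Int) (k : Int) (inp : String) :
    Int → Int → Int → PySem.Dict Char Int → Int
  | right, left, max_length, count =>
    if _h : right < n then
      match PySem.Str.pyGet? inp right with
      | none => max_length           -- unreachable under Pre_: IndexError
      | some c =>
        let count := if count.contains c then count else count.insert c 0
        let count := match count.get? c with
          | some v => count.insert c (v + 1)
          | none => count            -- unreachable: the key was just ensured
        let st := solutionInner k inp count.values.sum.toNat left count
        let left := st.1
        let count := st.2
        let total_chars := right - left + 1
        -- max_count / modifications_needed: computed by A, never used
        let _max_count := match PySem.List.max? count.values (fun v => v) with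
          | some m => m
          | none => 0                -- unreachable: count is nonempty here
        let _modifications_needed := total_chars - _max_count
        let max_length := max max_length total_chars
        solutionLoop n k inp (right + 1) left max_length count
    else max_length
  termination_by right => (n - right).toNat
  decreasing_by omega

def solution (n : Int) (k : Int) (inp : String) : Int :=
  solutionLoop n k inp 0 0 0 PySem.Dict.empty

-- ===== PORT B =====
-- `while others > kk:` loop for the fixed kept pair (a, b); the Nat fuel only
-- bounds the number of left-steps (left never passes the right end of the
-- window, so a fuel of len(s) is never exhausted); none = IndexError, unreachable.
def bShrink (kk : Int) (s : List Char) (a b : Char) :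
    Nat → Int → Int → Int × Int
  | 0, left, others => (left, others)
  | fuel + 1, left, others =>
    if kk < others then
      match PySem.List.pyGet? s left with
      | none => (left, others)       -- unreachable: IndexError
      | some c =>
        bShrink kk s a b fuel (left + 1) (if c ≠ a ∧ c ≠ b then others - 1 else others)
    else (left, others)

-- body of `for right in range(len(s))`; state = (left, others, best)
def bStep (kk : Int) (s : List Char) (a b : Char)
    (st : Int × Int × Int) (r : Int) : Int × Int × Int :=
  match PySem.List.pyGet? s r with
  | none => st                       -- unreachable: IndexError
  | some c =>
    let others := if c ≠ a ∧ c ≠ b then st.2.1 + 1 else st.2.1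
    let p := bShrink kk s a b s.length st.1 others
    let best := if st.2.2 < r - p.1 + 1 then r - p.1 + 1 else st.2.2
    (p.1, p.2, best)

-- one kept pair (a, b): slide the window once over s, threading best
def bPair (kk : Int) (s : List Char) (a b : Char) (best : Int) : Int :=
  ((PySem.List.pyRange 0 (s.length : Int) 1).foldl (bStep kk s a b) (0, 0, best)).2.2

def solution_alt (n : Int) (k : Int) (inp : String) : Int :=
  let s := if 0 < n then PySem.List.slice inp.toList none (some n) else []
  let kk := if 0 < k then k else 0
  let chars := PySem.List.dedup s    -- list(dict.fromkeys(s))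
  chars.foldl (fun best a => chars.foldl (fun best b => bPair kk s a b best) best) 0

-- ===== PRECONDITION & SPEC =====
-- A indexes inp[right] for every right in range(n): it raises IndexError iff n > len(inp).
-- k is unconstrained: only n > len(inp) makes A raise.
def Pre_solution (n : Int) (_k : Int) (inp : String) : Prop := n ≤ PySem.Str.len inp
instance (n : Int) (k : Int) (inp : String) : Decidable (Pre_solution n k inp) := by
  unfold Pre_solution; infer_instance

def pvWitness_solution : Int × Int × String := (4, 1, "abca")

def Spec_solution (n : Int) (k : Int) (inp : String) (out : Int) : Prop := out = solution_alt n k inp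
instance (n : Int) (k : Int) (inp : String) (out : Int) : Decidable (Spec_solution n k inp out) := by
  unfold Spec_solution; infer_instance

-- ===== CLAIM (what is proved, stated in full; the proofs are below) =====
def Claim_equal_solution : Prop := ∀ (n : Int) (k : Int) (inp : String),
  Dom_solution n k inp → Pre_solution n k inp → Spec_solution n k inp (solution n k inp)

-- ===== LEMMAS AND PROOFS =====

-- ================== windows of the processed prefix ==================

-- window t[l:r]
def winp (t : List Char) (l r : Nat) : List Char := (t.take r).drop l

lemma winp_self (t : List Char) (r : Nat) : winp t r r = [] := by
  apply List.drop_eq_nil_of_le; simp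

lemma winp_sublist (t : List Char) {l l' r r' : Nat} (hl : l ≤ l') (hr : r' ≤ r) :
    (winp t l' r').Sublist (winp t l r) := by
  have h1 : t.take r' = (t.take r).take r' := by rw [List.take_take, min_eq_left hr]
  have h2 : winp t l' r' = ((winp t l r).drop (l' - l)).take (r' - l') := by
    unfold winp
    rw [h1, List.drop_take, List.drop_drop]
    have h3 : l + (l' - l) = l' := by omega
    rw [h3]
  rw [h2]
  exact (List.take_sublist _ _).trans (List.drop_sublist _ _)

lemma winp_succ (t : List Char) {l r : Nat} (hl : l ≤ r) (hr : r < t.length) :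
    winp t l (r + 1) = winp t l r ++ [t[r]] := by
  unfold winp
  rw [List.take_succ, List.getElem?_eq_getElem hr]
  simp only [Option.toList_some]
  rw [List.drop_append_of_le_length (by simp [hl, Nat.le_of_lt hr])]

lemma winp_cons (t : List Char) {l r : Nat} (hlr : l < r) (hl : l < t.length) :
    winp t l r = t[l] :: winp t (l + 1) r := by
  unfold winp
  have h : l < (t.take r).length := by simp [hlr, hl]
  rw [List.drop_eq_getElem_cons h, List.getElem_take]

lemma length_winp (t : List Char) (l r : Nat) (hr : r ≤ t.length) :
    (winp t l r).length = r - l := by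
  simp [winp, Nat.min_eq_left hr]

-- ================== the number of chars outside the kept pair ==================

def othersN (a b : Char) (w : List Char) : Nat := w.countP (fun c => decide (c ≠ a ∧ c ≠ b))

lemma othersN_sublist (a b : Char) {w w' : List Char} (h : w.Sublist w') :
    othersN a b w ≤ othersN a b w' := h.countP_le

-- a window is feasible iff some kept pair leaves at most kk other characters
def goodP (kk : Int) (w : List Char) : Prop := ∃ a b, (othersN a b w : Int) ≤ kk

lemma goodP_nil {kk : Int} (hkk : 0 ≤ kk) : goodP kk [] :=
  ⟨'a', 'a', by simp [othersN, hkk]⟩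

lemma goodP_sublist {kk : Int} {w w' : List Char} (h : w.Sublist w') :
    goodP kk w' → goodP kk w := by
  rintro ⟨a, b, hab⟩
  exact ⟨a, b, le_trans (by exact_mod_cast othersN_sublist a b h) hab⟩

-- decidable form: for a nonempty window the kept pair can be drawn from its chars
def goodb (kk : Int) (w : List Char) : Bool :=
  match w with
  | [] => decide (0 ≤ kk)
  | _ :: _ =>
      (PySem.List.dedup w).any (fun a =>
        (PySem.List.dedup w).any (fun b => decide ((othersN a b w : Int) ≤ kk)))

lemma othersN_mono {a b a' b' : Char} (w : List Char)
    (h : ∀ c ∈ w, (c = a ∨ c = b) → (c = a' ∨ c = b')) :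
    othersN a' b' w ≤ othersN a b w := by
  apply List.countP_mono_left
  intro c hc hp
  simp only [decide_eq_true_eq] at hp ⊢
  obtain ⟨h1, h2⟩ := hp
  constructor
  · rintro rfl
    rcases h c hc (Or.inl rfl) with rfl | rfl
    · exact h1 rfl
    · exact h2 rfl
  · rintro rfl
    rcases h c hc (Or.inr rfl) with rfl | rfl
    · exact h1 rfl
    · exact h2 rfl

lemma goodb_iff {kk : Int} (hkk : 0 ≤ kk) (w : List Char) :
    goodb kk w = true ↔ goodP kk w := by
  cases w with
  | nil => simp [goodb, hkk, goodP_nil hkk]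
  | cons x xs =>
    simp only [goodb, List.any_eq_true, decide_eq_true_eq]
    constructor
    · rintro ⟨a, _, b, _, hab⟩; exact ⟨a, b, hab⟩
    · rintro ⟨a, b, hab⟩
      by_cases ha : a ∈ x :: xs
      · by_cases hb : b ∈ x :: xs
        · exact ⟨a, (PySem.List.mem_dedup _ _).2 ha, b, (PySem.List.mem_dedup _ _).2 hb, hab⟩
        · refine ⟨a, (PySem.List.mem_dedup _ _).2 ha, a, (PySem.List.mem_dedup _ _).2 ha, le_trans ?_ hab⟩
          have hm : othersN a a (x :: xs) ≤ othersN a b (x :: xs) :=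
            othersN_mono _ (fun c hc hcab => by
              rcases hcab with rfl | rfl
              · exact Or.inl rfl
              · exact absurd hc hb)
          exact_mod_cast hm
      · by_cases hb : b ∈ x :: xs
        · refine ⟨b, (PySem.List.mem_dedup _ _).2 hb, b, (PySem.List.mem_dedup _ _).2 hb, le_trans ?_ hab⟩
          have hm : othersN b b (x :: xs) ≤ othersN a b (x :: xs) :=
            othersN_mono _ (fun c hc hcab => by
              rcases hcab with rfl | rfl
              · exact absurd hc ha
              · exact Or.inl rfl)
          exact_mod_cast hm
        · refine ⟨x, (PySem.List.mem_dedup _ _).2 List.mem_cons_self, x,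
            (PySem.List.mem_dedup _ _).2 List.mem_cons_self, le_trans ?_ hab⟩
          have hm : othersN x x (x :: xs) ≤ othersN a b (x :: xs) :=
            othersN_mono _ (fun c hc hcab => by
              rcases hcab with rfl | rfl
              · exact absurd hc ha
              · exact absurd hc hb)
          exact_mod_cast hm

-- ================== minimal feasible window start ==================

def startp (p : List Char → Bool) (t : List Char) (r l : Nat) : Bool :=
  p (winp t l r) || decide (r ≤ l)

lemma startp_ex (p : List Char → Bool) (t : List Char) (r : Nat) :
    ∃ l, startp p t r l = true := ⟨r, by simp [startp]⟩

def minStart (p : List Char → Bool) (t : List Char) (r : Nat) : Nat :=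
  Nat.find (startp_ex p t r)

lemma minStart_le (p : List Char → Bool) (t : List Char) (r : Nat) :
    minStart p t r ≤ r := Nat.find_le (by simp [startp])

lemma p_minStart {p : List Char → Bool} (hnil : p [] = true) (t : List Char) (r : Nat) :
    p (winp t (minStart p t r) r) = true := by
  unfold minStart
  have h := Nat.find_spec (startp_ex p t r)
  unfold startp at h
  rw [Bool.or_eq_true, decide_eq_true_eq] at h
  rcases h with h' | h'
  · exact h'
  · have hle : Nat.find (startp_ex p t r) ≤ r := Nat.find_le (by simp [startp])
    have heq : Nat.find (startp_ex p t r) = r := le_antisymm hle h'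
    rw [heq, winp_self]; exact hnil

lemma not_p_of_lt_minStart {p : List Char → Bool} {t : List Char} {r l : Nat}
    (hl : l < minStart p t r) : p (winp t l r) = false ∧ l < r := by
  unfold minStart at hl
  have h := Nat.find_min (startp_ex p t r) hl
  simp only [startp, Bool.or_eq_true, decide_eq_true_eq, not_or, not_le] at h
  exact ⟨by simpa using (fun hp => h.1 hp), h.2⟩

lemma p_iff_minStart_le {p : List Char → Bool}
    (hanti : ∀ w w', w.Sublist w' → p w' = true → p w = true)
    (hnil : p [] = true) {t : List Char} {r l : Nat} :
    p (winp t l r) = true ↔ minStart p t r ≤ l := by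
  constructor
  · intro h
    by_contra hlt
    push_neg at hlt
    have := (not_p_of_lt_minStart hlt).1
    rw [h] at this; simp at this
  · intro h
    exact hanti _ _ (winp_sublist t h le_rfl) (p_minStart hnil t r)

lemma minStart_mono {p : List Char → Bool}
    (hanti : ∀ w w', w.Sublist w' → p w' = true → p w = true)
    (t : List Char) (r : Nat) : minStart p t r ≤ minStart p t (r + 1) := by
  by_contra h
  push_neg at h
  have h1 := Nat.find_spec (startp_ex p t (r + 1))
  unfold startp at h1
  rw [Bool.or_eq_true, decide_eq_true_eq] at h1
  rcases h1 with h' | h'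
  · have h'2 : p (winp t (minStart p t (r + 1)) (r + 1)) = true := h'
    have h2 : p (winp t (minStart p t (r + 1)) r) = true :=
      hanti _ _ (winp_sublist t le_rfl (Nat.le_succ r)) h'2
    have h3 := (not_p_of_lt_minStart h).1
    rw [h2] at h3; simp at h3
  · have h'2 : r + 1 ≤ minStart p t (r + 1) := h'
    have h4 := minStart_le p t r
    omega

-- ================== count-dict representation (A's `count`) ==================

def valsW (w : List Char) : List Int := (PySem.List.dedup w).map (fun c => ((w.count c : Nat) : Int))

lemma toFinset_dedup (w : List Char) : (PySem.List.dedup w).toFinset = w.toFinset := by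
  ext x; simp [PySem.List.mem_dedup]

lemma valsW_sum (w : List Char) : (valsW w).sum = (w.length : Int) := by
  unfold valsW
  have h1 : ((PySem.List.dedup w).map (fun c => ((w.count c : Nat) : Int))).sum
      = (((PySem.List.dedup w).map (fun c => w.count c)).sum : Int) := by
    induction PySem.List.dedup w with
    | nil => simp
    | cons y ys ih => simp [ih]
  rw [h1]
  have h2 : ((PySem.List.dedup w).map (fun c => w.count c)).sum = w.length := by
    rw [Eq.symm (List.sum_toFinset (fun c => w.count c) (PySem.List.nodup_dedup w)),
      toFinset_dedup, List.sum_toFinset_count_eq_length]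
  rw [h2]

lemma valsW_pos (w : List Char) {v : Int} (hv : v ∈ valsW w) : 1 ≤ v := by
  simp only [valsW, List.mem_map] at hv
  obtain ⟨c, hc, rfl⟩ := hv
  have : c ∈ w := (PySem.List.mem_dedup _ _).1 hc
  have := List.count_pos_iff.2 this
  exact_mod_cast this

lemma valsW_length (w : List Char) : (valsW w).length = (PySem.List.dedup w).length := by
  simp [valsW]

def DRep (w : List Char) (d : PySem.Dict Char Int) : Prop :=
  d.keys.Nodup ∧ ∀ c : Char, d.get? c = if w.count c = 0 then none else some ((w.count c : Nat) : Int)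

lemma DRep_empty : DRep [] PySem.Dict.empty :=
  ⟨by rw [PySem.Dict.keys_empty]; exact List.nodup_nil, fun c => by simp [PySem.Dict.get?_empty]⟩

-- erase facts (not in the prelude)
lemma keys_erase_eq (d : PySem.Dict Char Int) (c : Char) :
    (d.erase c).keys = d.keys.filter (fun k => !(k == c)) := by
  show (List.filter (fun p => !(p.1 == c)) d.items).map (fun p => p.1)
      = List.filter (fun k => !(k == c)) (d.items.map (fun p => p.1))
  rw [List.filter_map]
  rfl

lemma nodup_keys_erase (d : PySem.Dict Char Int) (c : Char) (h : d.keys.Nodup) :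
    (d.erase c).keys.Nodup := by
  rw [keys_erase_eq]; exact h.filter _

lemma get?_erase_self (d : PySem.Dict Char Int) (c : Char) :
    (d.erase c).get? c = none := by
  rw [PySem.Dict.get?_eq_none_iff_not_mem_keys, keys_erase_eq]
  intro hmem
  have := List.of_mem_filter hmem
  simp at this

lemma get?_erase_of_ne (d : PySem.Dict Char Int) {c c' : Char} (hne : c' ≠ c)
    (h : d.keys.Nodup) : (d.erase c).get? c' = d.get? c' := by
  cases hg : d.get? c' with
  | some v =>
    rw [PySem.Dict.get?_eq_some_iff_mem_items _ _ _ (nodup_keys_erase d c h)]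
    have hm := (PySem.Dict.get?_eq_some_iff_mem_items _ _ _ h).1 hg
    exact List.mem_filter.2 ⟨hm, by simp [hne]⟩
  | none =>
    rw [PySem.Dict.get?_eq_none_iff_not_mem_keys] at hg ⊢
    intro hmem
    rw [keys_erase_eq] at hmem
    exact hg (List.mem_of_mem_filter hmem)

-- the update A performs for the char pushed at the right end
lemma count_update_eq (d : PySem.Dict Char Int) (c : Char) :
    (match (if d.contains c then d else d.insert c 0).get? c with
      | some v => (if d.contains c then d else d.insert c 0).insert c (v + 1)
      | none => (if d.contains c then d else d.insert c 0)) =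
    d.insert c (d.getD c 0 + 1) := by
  by_cases h : d.contains c = true
  · rw [if_pos h]
    cases hg : d.get? c with
    | none =>
      exfalso
      rw [PySem.Dict.get?_eq_none_iff_contains] at hg
      simp [h] at hg
    | some v =>
      rw [PySem.Dict.getD_eq_get?_getD, hg]
      rfl
  · have h' : d.contains c = false := by simpa using h
    rw [if_neg (by simp [h'])]
    rw [PySem.Dict.getD_of_not_contains d _ h']
    have : (d.insert c 0).get? c = some 0 := PySem.Dict.get?_insert_self d c 0
    simp only [this]
    rw [PySem.Dict.insert_insert_self]

lemma DRep_push {w : List Char} {d : PySem.Dict Char Int} (h : DRep w d) (c : Char) :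
    DRep (w ++ [c]) (d.insert c (d.getD c 0 + 1)) := by
  obtain ⟨hnd, hg⟩ := h
  refine ⟨PySem.Dict.nodup_keys_insert d c _ hnd, fun c' => ?_⟩
  by_cases hc : c' = c
  · subst hc
    rw [PySem.Dict.get?_insert_self, PySem.Dict.getD_eq_get?_getD, hg c']
    have hcount : (w ++ [c']).count c' = w.count c' + 1 := by
      rw [List.count_append]; simp
    rw [hcount]
    by_cases h0 : w.count c' = 0
    · simp [h0]
    · rw [if_neg h0, if_neg (by omega)]
      simp only [Option.getD_some]
      norm_cast
  · have hrw := PySem.Dict.get?_insert_of_ne d (d.getD c 0 + 1) hc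
    rw [hrw, hg c']
    have hcount : (w ++ [c]).count c' = w.count c' := by
      rw [List.count_append, List.count_singleton]
      simp [Ne.symm hc]
    rw [hcount]

lemma DRep_count_of_get? {w : List Char} {d : PySem.Dict Char Int} (h : DRep w d)
    {x : Char} {v : Int} (hv : d.get? x = some v) :
    v = ((w.count x : Nat) : Int) ∧ w.count x ≠ 0 := by
  have := h.2 x
  rw [hv] at this
  by_cases h0 : w.count x = 0
  · rw [if_pos h0] at this; cases this
  · rw [if_neg h0] at this
    exact ⟨Option.some_inj.1 this, h0⟩

lemma DRep_pop {x : Char} {w' : List Char} {d : PySem.Dict Char Int} {v : Int}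
    (h : DRep (x :: w') d) (hv : d.get? x = some v) :
    DRep w' (if v - 1 == 0 then (d.insert x (v - 1)).erase x else d.insert x (v - 1)) := by
  obtain ⟨hnd, hg⟩ := h
  obtain ⟨hveq, -⟩ := DRep_count_of_get? ⟨hnd, hg⟩ hv
  have hcx : (x :: w').count x = w'.count x + 1 := by simp
  have hv1 : v - 1 = ((w'.count x : Nat) : Int) := by
    rw [hveq, hcx]; push_cast; ring
  have hnd1 : (d.insert x (v - 1)).keys.Nodup := PySem.Dict.nodup_keys_insert d x _ hnd
  by_cases h0 : w'.count x = 0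
  · rw [if_pos (by rw [hv1, h0]; simp)]
    refine ⟨nodup_keys_erase _ _ hnd1, fun c' => ?_⟩
    by_cases hc : c' = x
    · subst hc
      rw [get?_erase_self, if_pos h0]
    · have hrw := PySem.Dict.get?_insert_of_ne d (v - 1) hc
      rw [get?_erase_of_ne _ hc hnd1, hrw, hg c']
      have : (x :: w').count c' = w'.count c' := by
        rw [List.count_cons]; simp [Ne.symm hc]
      rw [this]
  · rw [if_neg (by rw [hv1]; simpa using h0)]
    refine ⟨hnd1, fun c' => ?_⟩
    by_cases hc : c' = x
    · subst hc
      rw [PySem.Dict.get?_insert_self, hv1, if_neg h0]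
    · have hrw := PySem.Dict.get?_insert_of_ne d (v - 1) hc
      rw [hrw, hg c']
      have : (x :: w').count c' = w'.count c' := by
        rw [List.count_cons]; simp [Ne.symm hc]
      rw [this]

-- keys/size/values of a representing dict, up to permutation
lemma DRep_mem_keys {w : List Char} {d : PySem.Dict Char Int} (h : DRep w d) (c : Char) :
    c ∈ d.keys ↔ c ∈ w := by
  constructor
  · intro hc
    by_contra hw
    have h0 : w.count c = 0 := by
      rw [List.count_eq_zero]; exact hw
    have := h.2 c
    rw [if_pos h0, PySem.Dict.get?_eq_none_iff_not_mem_keys] at this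
    exact this hc
  · intro hw
    have h0 : w.count c ≠ 0 := by
      have := List.count_pos_iff.2 hw; omega
    have := h.2 c
    rw [if_neg h0] at this
    by_contra hk
    rw [← PySem.Dict.get?_eq_none_iff_not_mem_keys] at hk
    rw [hk] at this; cases this

lemma DRep_keys_perm {w : List Char} {d : PySem.Dict Char Int} (h : DRep w d) :
    d.keys.Perm (PySem.List.dedup w) := by
  rw [List.perm_ext_iff_of_nodup h.1 (PySem.List.nodup_dedup w)]
  intro c
  rw [DRep_mem_keys h, PySem.List.mem_dedup]

lemma DRep_size {w : List Char} {d : PySem.Dict Char Int} (h : DRep w d) :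
    d.size = (PySem.List.dedup w).length := by
  have h1 : d.size = d.keys.length := by
    show d.items.length = (d.items.map (fun p => p.1)).length
    simp
  rw [h1, (DRep_keys_perm h).length_eq]

lemma DRep_values_perm {w : List Char} {d : PySem.Dict Char Int} (h : DRep w d) :
    d.values.Perm (valsW w) := by
  rw [PySem.Dict.values_eq_map_keys d h.1 0]
  have h1 : d.keys.map (fun c => d.getD c 0) = d.keys.map (fun c => ((w.count c : Nat) : Int)) := by
    apply List.map_congr_left
    intro c hc
    have hw : c ∈ w := (DRep_mem_keys h c).1 hc
    have h0 : w.count c ≠ 0 := by have := List.count_pos_iff.2 hw; omega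
    rw [PySem.Dict.getD_eq_get?_getD, h.2 c, if_neg h0]
    rfl
  rw [h1]
  exact (DRep_keys_perm h).map _

lemma DRep_values_sum {w : List Char} {d : PySem.Dict Char Int} (h : DRep w d) :
    d.values.sum = (w.length : Int) := by
  rw [(DRep_values_perm h).sum_eq, valsW_sum]


-- ================== bridge: A's break condition vs the kept-pair predicate ==================

def checkSpec (w : List Char) : Int :=
  ((PySem.List.sorted (valsW w) (fun v => v) true).drop 2).sum

lemma sorted_desc_eq_of_perm {l1 l2 : List Int} (hp : l1.Perm l2) :
    PySem.List.sorted l1 (fun v => v) true = PySem.List.sorted l2 (fun v => v) true := by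
  apply PySem.List.eq_of_perm_of_pairwise_le_of_injective (key := fun x : Int => -x) neg_injective
  · exact ((PySem.List.sorted_perm l1 _ true).trans hp).trans (PySem.List.sorted_perm l2 _ true).symm
  · exact (PySem.List.sorted_pairwise_rev l1 _).imp (fun h => by omega)
  · exact (PySem.List.sorted_pairwise_rev l2 _).imp (fun h => by omega)

lemma small_good {kk : Int} (hkk : 0 ≤ kk) (w : List Char)
    (h : (PySem.List.dedup w).length ≤ 2) : goodP kk w := by
  obtain ⟨a, b, hab⟩ : ∃ a b, ∀ c ∈ w, c = a ∨ c = b := by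
    cases hd : PySem.List.dedup w with
    | nil =>
      refine ⟨'a', 'a', fun c hc => ?_⟩
      have := (PySem.List.mem_dedup w c).2 hc
      rw [hd] at this; cases this
    | cons a tl =>
      cases tl with
      | nil =>
        refine ⟨a, a, fun c hc => ?_⟩
        have := (PySem.List.mem_dedup w c).2 hc
        rw [hd] at this
        simp at this
        exact Or.inl this
      | cons b tl2 =>
        have htl2 : tl2 = [] := by
          rw [hd] at h; simp only [List.length_cons] at h
          exact List.eq_nil_of_length_eq_zero (by omega)
        subst htl2
        refine ⟨a, b, fun c hc => ?_⟩
        have := (PySem.List.mem_dedup w c).2 hc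
        rw [hd] at this
        simpa using this
  refine ⟨a, b, le_trans ?_ hkk⟩
  have h0 : othersN a b w = 0 := by
    apply List.countP_eq_zero.2
    intro c hc
    simp only [decide_eq_true_eq, not_and, not_not]
    intro hca
    rcases hab c hc with rfl | rfl
    · exact absurd rfl hca
    · rfl
  simp [h0]

lemma othersN_cons (a b c : Char) (t : List Char) :
    othersN a b (c :: t) = othersN a b t + (if c = a ∨ c = b then 0 else 1) := by
  unfold othersN
  rw [List.countP_cons]
  by_cases h1 : c = a
  · simp [h1]
  · by_cases h2 : c = b <;> simp [h1, h2]

lemma othersN_pair_eq {a b : Char} (hne : a ≠ b) (w : List Char) :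
    othersN a b w + w.count a + w.count b = w.length := by
  induction w with
  | nil => simp [othersN]
  | cons c t ih =>
    rw [othersN_cons, List.count_cons, List.count_cons, List.length_cons]
    by_cases h1 : c = a
    · subst h1
      simp [hne]
      omega
    · by_cases h2 : c = b
      · subst h2
        simp [h1]
        omega
      · simp [h1, h2]
        omega

lemma othersN_self_eq (a : Char) (w : List Char) :
    othersN a a w + w.count a = w.length := by
  induction w with
  | nil => simp [othersN]
  | cons c t ih =>
    rw [othersN_cons, List.count_cons, List.length_cons]
    by_cases h1 : c = a
    · subst h1
      simp
      omega
    · simp [h1]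
      omega

lemma exists_pair_top {w : List Char} {v1 v2 : Int} {rest : List Int}
    (hs : PySem.List.sorted (valsW w) (fun v => v) true = v1 :: v2 :: rest) :
    ∃ a b : Char, a ≠ b ∧ ((w.count a : Nat) : Int) = v1 ∧ ((w.count b : Nat) : Int) = v2 := by
  have hperm : (valsW w).Perm (v1 :: v2 :: rest) := by
    rw [← hs]; exact (PySem.List.sorted_perm (valsW w) _ true).symm
  have hv1 : v1 ∈ valsW w := hperm.symm.subset List.mem_cons_self
  simp only [valsW, List.mem_map] at hv1
  obtain ⟨a, ha, hav⟩ := hv1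
  obtain ⟨l1, l2, hsplit⟩ := List.append_of_mem ha
  have hmap : valsW w = (l1.map (fun c => ((w.count c : Nat) : Int))) ++
      ((w.count a : Nat) : Int) :: (l2.map (fun c => ((w.count c : Nat) : Int))) := by
    rw [valsW, hsplit]; simp
  have hmid : (valsW w).Perm (((w.count a : Nat) : Int) ::
      ((l1 ++ l2).map (fun c => ((w.count c : Nat) : Int)))) := by
    rw [hmap]
    have := List.perm_middle (a := ((w.count a : Nat) : Int))
      (l₁ := l1.map (fun c => ((w.count c : Nat) : Int)))
      (l₂ := l2.map (fun c => ((w.count c : Nat) : Int)))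
    simpa using this
  have hperm2 : (((w.count a : Nat) : Int) ::
      ((l1 ++ l2).map (fun c => ((w.count c : Nat) : Int)))).Perm (v1 :: v2 :: rest) :=
    hmid.symm.trans hperm
  rw [hav] at hperm2
  have htail : ((l1 ++ l2).map (fun c => ((w.count c : Nat) : Int))).Perm (v2 :: rest) :=
    hperm2.cons_inv
  have hv2 : v2 ∈ (l1 ++ l2).map (fun c => ((w.count c : Nat) : Int)) :=
    htail.symm.subset List.mem_cons_self
  simp only [List.mem_map] at hv2
  obtain ⟨b, hb, hbv⟩ := hv2
  have hnd := PySem.List.nodup_dedup w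
  rw [hsplit] at hnd
  have hanotin : a ∉ l1 ++ l2 := by
    rw [List.nodup_middle] at hnd
    exact (List.nodup_cons.1 hnd).1
  refine ⟨a, b, ?_, hav, hbv⟩
  rintro rfl
  exact hanotin hb

lemma pair_le_top2 {w : List Char} {v1 v2 : Int} {rest : List Int}
    (hs : PySem.List.sorted (valsW w) (fun v => v) true = v1 :: v2 :: rest)
    {x y : Int} {l' : List Int} (hp : (valsW w).Perm (x :: l')) (hy : y ∈ l') :
    x + y ≤ v1 + v2 := by
  have hpw := PySem.List.sorted_pairwise_rev (valsW w) (fun v => v)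
  rw [hs] at hpw
  rw [List.pairwise_cons] at hpw
  obtain ⟨h1, hpw2⟩ := hpw
  rw [List.pairwise_cons] at hpw2
  obtain ⟨h2, -⟩ := hpw2
  have hsp : (v1 :: v2 :: rest).Perm (x :: l') := by
    have := (PySem.List.sorted_perm (valsW w) (fun v => v) true)
    rw [hs] at this
    exact this.trans hp
  have hxm : x ∈ v1 :: v2 :: rest := hsp.symm.subset List.mem_cons_self
  have hym : y ∈ v1 :: v2 :: rest := hsp.symm.subset (List.mem_cons_of_mem _ hy)
  have hle1 : ∀ z ∈ v1 :: v2 :: rest, z ≤ v1 := by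
    intro z hz
    rcases List.mem_cons.1 hz with rfl | hz'
    · exact le_rfl
    · exact h1 z hz'
  have hx1 : x ≤ v1 := hle1 x hxm
  have hy1 : y ≤ v1 := hle1 y hym
  by_cases hcase : v2 < x ∧ v2 < y
  · exfalso
    have hr : rest.countP (fun z => decide (v2 < z)) = 0 :=
      List.countP_eq_zero.2 (fun z hz => by simpa using not_lt.2 (h2 z hz))
    have hq2 : (decide (v2 < v2)) = false := by simp
    have hqx : (decide (v2 < x)) = true := by simpa using hcase.1
    have hcount1 : (v1 :: v2 :: rest).countP (fun z => decide (v2 < z)) ≤ 1 := by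
      simp [List.countP_cons, hr, hq2]
      split_ifs <;> omega
    have hpos : 0 < l'.countP (fun z => decide (v2 < z)) :=
      List.countP_pos_iff.2 ⟨y, hy, by simpa using hcase.2⟩
    have hcount2 : (x :: l').countP (fun z => decide (v2 < z))
        = l'.countP (fun z => decide (v2 < z)) + 1 := by
      rw [List.countP_cons, hqx]
      simp
    have := hsp.countP_eq (fun z => decide (v2 < z))
    omega
  · rcases not_and_or.1 hcase with h | h
    · have : x ≤ v2 := not_lt.1 h
      omega
    · have : y ≤ v2 := not_lt.1 h
      omega

lemma count_le_top {w : List Char} {v1 : Int} {tl : List Int}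
    (hs : PySem.List.sorted (valsW w) (fun v => v) true = v1 :: tl) (c : Char) :
    ((w.count c : Nat) : Int) ≤ v1 ∧ 1 ≤ v1 := by
  have hhead := PySem.List.key_head_sorted_rev_ge (valsW w) (fun v => v) hs
  have hv1mem : v1 ∈ valsW w := by
    have := (PySem.List.sorted_perm (valsW w) (fun v => v) true)
    rw [hs] at this
    exact this.subset List.mem_cons_self
  have h1 : 1 ≤ v1 := valsW_pos w hv1mem
  constructor
  · by_cases hc : c ∈ w
    · have hm : ((w.count c : Nat) : Int) ∈ valsW w :=
        List.mem_map.2 ⟨c, (PySem.List.mem_dedup w c).2 hc, rfl⟩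
      exact hhead _ hm
    · have : w.count c = 0 := List.count_eq_zero.2 hc
      rw [this]; simpa using le_trans zero_le_one h1
  · exact h1

lemma three_distinct_not_pair {w : List Char} (hlen : 2 < (PySem.List.dedup w).length)
    (a b : Char) (hall : ∀ c ∈ w, ¬(c ≠ a ∧ c ≠ b)) : False := by
  cases hd : PySem.List.dedup w with
  | nil => rw [hd] at hlen; simp at hlen
  | cons c1 tl1 =>
    cases tl1 with
    | nil => rw [hd] at hlen; simp at hlen
    | cons c2 tl2 =>
      cases tl2 with
      | nil => rw [hd] at hlen; simp at hlen
      | cons c3 tl3 =>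
        have hnd := PySem.List.nodup_dedup w
        rw [hd] at hnd
        have h12 : c1 ≠ c2 := by
          intro h; rw [h] at hnd; simp at hnd
        have h13 : c1 ≠ c3 := by
          intro h; rw [h] at hnd; simp at hnd
        have h23 : c2 ≠ c3 := by
          intro h; rw [h] at hnd; simp at hnd
        have hm : ∀ c, c ∈ PySem.List.dedup w → (c = a ∨ c = b) := by
          intro c hc
          have hcw := (PySem.List.mem_dedup w c).1 hc
          have := hall c hcw
          tauto
        have m1 := hm c1 (by rw [hd]; simp)
        have m2 := hm c2 (by rw [hd]; simp)
        have m3 := hm c3 (by rw [hd]; simp)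
        rcases m1 with rfl | rfl <;> rcases m2 with rfl | rfl <;> rcases m3 with rfl | rfl <;>
          simp_all

lemma bridge (k : Int) (w : List Char) :
    ((PySem.List.dedup w).length ≤ 2 ∨ checkSpec w ≤ k) ↔ goodP (max k 0) w := by
  have hkk : (0 : Int) ≤ max k 0 := le_max_right k 0
  by_cases hlen : (PySem.List.dedup w).length ≤ 2
  · simp only [hlen, true_or, true_iff]
    exact small_good hkk w hlen
  · simp only [hlen, false_or]
    have hlen' : 2 < (PySem.List.dedup w).length := by omega
    have hslen : 2 < (PySem.List.sorted (valsW w) (fun v => v) true).length := by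
      rw [PySem.List.length_sorted, valsW_length]; omega
    cases hs : PySem.List.sorted (valsW w) (fun v => v) true with
    | nil => rw [hs] at hslen; simp at hslen
    | cons v1 tl =>
      cases tl with
      | nil => rw [hs] at hslen; simp at hslen
      | cons v2 rest =>
        have hsum : v1 + v2 + rest.sum = (w.length : Int) := by
          have hp := PySem.List.sorted_perm (valsW w) (fun v => v) true
          rw [hs] at hp
          have := hp.sum_eq
          rw [valsW_sum] at this
          simp only [List.sum_cons] at this
          omega
        have hcheck : checkSpec w = rest.sum := by
          unfold checkSpec
          rw [hs]
          rfl
        constructor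
        · intro hck
          obtain ⟨a, b, hne, hav, hbv⟩ := exists_pair_top hs
          refine ⟨a, b, ?_⟩
          have harith := othersN_pair_eq hne w
          have : (othersN a b w : Int) = rest.sum := by
            have h1 : (othersN a b w : Int) + ((w.count a : Nat) : Int) + ((w.count b : Nat) : Int)
                = (w.length : Int) := by exact_mod_cast harith
            rw [hav, hbv] at h1
            omega
          rw [this, ← hcheck]
          exact le_trans hck (le_max_left k 0)
        · rintro ⟨a, b, hab⟩
          rw [hcheck]
          -- rest.sum ≤ othersN a b w
          have hkey : rest.sum ≤ (othersN a b w : Int) := by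
            by_cases hne : a = b
            · subst hne
              have harith := othersN_self_eq a w
              have h1 : (othersN a a w : Int) + ((w.count a : Nat) : Int) = (w.length : Int) := by
                exact_mod_cast harith
              obtain ⟨hca, hv1⟩ := count_le_top hs a
              have hv2 : 1 ≤ v2 := by
                have hv2mem : v2 ∈ valsW w := by
                  have hp := PySem.List.sorted_perm (valsW w) (fun v => v) true
                  rw [hs] at hp
                  exact hp.subset (by simp)
                exact valsW_pos w hv2mem
              omega
            · have harith := othersN_pair_eq hne w
              have h1 : (othersN a b w : Int) + ((w.count a : Nat) : Int) + ((w.count b : Nat) : Int)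
                  = (w.length : Int) := by exact_mod_cast harith
              have hv2 : 1 ≤ v2 := by
                have hv2mem : v2 ∈ valsW w := by
                  have hp := PySem.List.sorted_perm (valsW w) (fun v => v) true
                  rw [hs] at hp
                  exact hp.subset (by simp)
                exact valsW_pos w hv2mem
              have hpairsum : ((w.count a : Nat) : Int) + ((w.count b : Nat) : Int) ≤ v1 + v2 := by
                by_cases haw : a ∈ w
                · by_cases hbw : b ∈ w
                  · -- both counted at distinct positions of valsW
                    obtain ⟨l1, l2, hsplit⟩ := List.append_of_mem ((PySem.List.mem_dedup w a).2 haw)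
                    have hmid : (valsW w).Perm (((w.count a : Nat) : Int) ::
                        ((l1 ++ l2).map (fun c => ((w.count c : Nat) : Int)))) := by
                      have hmap : valsW w = (l1.map (fun c => ((w.count c : Nat) : Int))) ++
                          ((w.count a : Nat) : Int) :: (l2.map (fun c => ((w.count c : Nat) : Int))) := by
                        rw [valsW, hsplit]; simp
                      rw [hmap]
                      simpa using List.perm_middle (a := ((w.count a : Nat) : Int))
                        (l₁ := l1.map (fun c => ((w.count c : Nat) : Int)))
                        (l₂ := l2.map (fun c => ((w.count c : Nat) : Int)))
                    have hbmem : ((w.count b : Nat) : Int) ∈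
                        (l1 ++ l2).map (fun c => ((w.count c : Nat) : Int)) := by
                      have hbd := (PySem.List.mem_dedup w b).2 hbw
                      rw [hsplit] at hbd
                      have hbl : b ∈ l1 ++ l2 := by
                        rcases List.mem_append.1 hbd with h | h
                        · exact List.mem_append.2 (Or.inl h)
                        · rcases List.mem_cons.1 h with h' | h'
                          · exact absurd h' (Ne.symm hne)
                          · exact List.mem_append.2 (Or.inr h')
                      exact List.mem_map.2 ⟨b, hbl, rfl⟩
                    exact pair_le_top2 hs hmid hbmem
                  · have h0 : w.count b = 0 := List.count_eq_zero.2 hbw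
                    obtain ⟨hca, hv1⟩ := count_le_top hs a
                    rw [h0]
                    simpa using by omega
                · have h0 : w.count a = 0 := List.count_eq_zero.2 haw
                  obtain ⟨hcb, hv1⟩ := count_le_top hs b
                  rw [h0]
                  simpa using by omega
              omega
          -- conclude: either k ≥ 0 and we are done, or k < 0 is impossible
          by_cases hk0 : 0 ≤ k
          · rw [max_eq_left hk0] at hab
            omega
          · exfalso
            rw [max_eq_right (by omega)] at hab
            have h0 : othersN a b w = 0 := by omega
            have hall : ∀ c ∈ w, ¬(c ≠ a ∧ c ≠ b) := by
              have := List.countP_eq_zero.1 h0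
              intro c hc
              have := this c hc
              simpa using this
            exact three_distinct_not_pair hlen' a b hall


-- ================== A's sliding window equals the per-step minimal starts ==================

def tOf (n : Int) (inp : String) : List Char := inp.toList.take n.toNat

def mA (k : Int) (t : List Char) (r : Nat) : Nat := minStart (goodb (max k 0)) t r

-- running max of (j - f j) over j = r+1, ..., stop
def winMax (f : Nat → Nat) (r stop : Nat) (acc : Int) : Int :=
  (List.range' (r + 1) (stop - r)).foldl (fun (a : Int) (j : Nat) => max a ((j : Int) - (f j : Int))) acc

lemma goodb_nil_true (k : Int) : goodb (max k 0) [] = true := by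
  have := le_max_right k 0
  simp [goodb, this]

lemma goodb_anti (k : Int) :
    ∀ w w', w.Sublist w' → goodb (max k 0) w' = true → goodb (max k 0) w = true := by
  intro w w' hs h
  have hkk := le_max_right k 0
  exact (goodb_iff hkk w).2 (goodP_sublist hs ((goodb_iff hkk w').1 h))

lemma mA_le (k : Int) (t : List Char) (r : Nat) : mA k t r ≤ r := minStart_le _ _ _

lemma mA_mono (k : Int) (t : List Char) (r : Nat) : mA k t r ≤ mA k t (r + 1) :=
  minStart_mono (goodb_anti k) t r

lemma mA_zero (k : Int) (t : List Char) : mA k t 0 = 0 := Nat.le_zero.1 (mA_le k t 0)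

lemma mA_le_iff (k : Int) (t : List Char) (r l : Nat) :
    goodP (max k 0) (winp t l r) ↔ mA k t r ≤ l := by
  rw [← goodb_iff (le_max_right k 0)]
  exact p_iff_minStart_le (goodb_anti k) (goodb_nil_true k)

lemma winMax_stop {f : Nat → Nat} {r stop : Nat} (h : stop ≤ r) (acc : Int) :
    winMax f r stop acc = acc := by
  unfold winMax
  rw [Nat.sub_eq_zero_of_le h]
  rfl

lemma winMax_step {f : Nat → Nat} {r stop : Nat} (h : r < stop) (acc : Int) :
    winMax f r stop acc = winMax f (r + 1) stop (max acc ((r + 1 : Int) - (f (r + 1) : Int))) := by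
  unfold winMax
  have h1 : stop - r = (stop - (r + 1)) + 1 := by omega
  rw [h1, List.range'_succ]
  simp

lemma length_tOf (n : Int) (inp : String) (hpre : n ≤ PySem.Str.len inp) :
    (tOf n inp).length = n.toNat := by
  unfold tOf
  rw [List.length_take]
  have : (PySem.Str.len inp) = (inp.toList.length : Int) := by simp [PySem.Str.len_eq]
  omega

lemma pyGet?_tOf (n : Int) (inp : String) (hpre : n ≤ PySem.Str.len inp) (i : Nat)
    (hi : i < n.toNat) : PySem.Str.pyGet? inp (i : Int) = (tOf n inp)[i]? := by
  rw [PySem.Str.pyGet?_natCast]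
  unfold tOf
  rw [List.getElem?_take, if_pos hi]

-- A's break condition, translated through the dict representation
lemma checkA_eq {w : List Char} {d : PySem.Dict Char Int} (h : DRep w d) :
    (PySem.List.slice (PySem.List.sorted d.values (fun v => v) true) (some 2) none).sum
      = checkSpec w := by
  rw [PySem.List.slice_from _ (by norm_num : (0 : Int) ≤ 2)]
  rw [sorted_desc_eq_of_perm (DRep_values_perm h)]
  rfl

-- the inner while-loop reaches exactly the minimal feasible start
lemma innerA_eq (n k : Int) (inp : String) (hpre : n ≤ PySem.Str.len inp)
    (r1 : Nat) (hr1 : r1 ≤ n.toNat) :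
    ∀ (fuel l : Nat) (d : PySem.Dict Char Int),
      DRep (winp (tOf n inp) l r1) d →
      l ≤ mA k (tOf n inp) r1 →
      mA k (tOf n inp) r1 ≤ l + fuel →
      ∃ d', solutionInner k inp fuel (l : Int) d = (((mA k (tOf n inp) r1 : Nat) : Int), d') ∧
        DRep (winp (tOf n inp) (mA k (tOf n inp) r1) r1) d' := by
  intro fuel
  induction fuel with
  | zero =>
    intro l d hrep hle hfuel
    have hl : l = mA k (tOf n inp) r1 := by omega
    subst hl
    exact ⟨d, rfl, hrep⟩
  | succ fuel ih =>
    intro l d hrep hle hfuel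
    set t := tOf n inp with ht
    by_cases hgood : goodP (max k 0) (winp t l r1)
    · -- the loop stops here, and l is already minimal
      have hl : l = mA k t r1 := le_antisymm hle ((mA_le_iff k t r1 l).1 hgood)
      subst hl
      refine ⟨d, ?_, hrep⟩
      rw [solutionInner]
      have hbr := (bridge k (winp t (mA k t r1) r1)).2 hgood
      by_cases hsz : 2 < d.size
      · rw [if_pos hsz]
        rw [if_pos ?_]
        rw [checkA_eq hrep]
        rcases hbr with h | h
        · exfalso
          rw [DRep_size hrep] at hsz
          omega
        · exact h
      · rw [if_neg hsz]
    · -- one shrink step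
      have hlt : l < mA k t r1 := by
        rcases Nat.lt_or_ge l (mA k t r1) with h | h
        · exact h
        · exact absurd ((mA_le_iff k t r1 l).2 h) hgood
      have hltr : l < r1 := by
        have := mA_le k t r1
        omega
      have hlen : t.length = n.toNat := length_tOf n inp hpre
      have hlt_len : l < t.length := by omega
      have hget : PySem.Str.pyGet? inp (l : Int) = some (t[l]'hlt_len) := by
        rw [pyGet?_tOf n inp hpre l (by omega)]
        exact List.getElem?_eq_getElem hlt_len
      have hwin : winp t l r1 = t[l]'hlt_len :: winp t (l + 1) r1 := winp_cons t hltr hlt_len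
      have hcnt : (winp t l r1).count (t[l]'hlt_len) ≠ 0 := by
        rw [hwin]
        simp
      have hgetd : d.get? (t[l]'hlt_len) =
          some (((winp t l r1).count (t[l]'hlt_len) : Nat) : Int) := by
        rw [hrep.2, if_neg hcnt]
      -- the new dict after the decrement step
      have hrep2 := DRep_pop (x := t[l]'hlt_len) (w' := winp t (l + 1) r1)
        (d := d) (hwin ▸ hrep) hgetd
      have hbad : ¬ ((PySem.List.dedup (winp t l r1)).length ≤ 2 ∨ checkSpec (winp t l r1) ≤ k) := by
        rw [bridge]
        exact hgood
      push_neg at hbad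
      obtain ⟨hbad1, hbad2⟩ := hbad
      rw [solutionInner]
      rw [if_pos (by rw [DRep_size hrep]; omega)]
      rw [checkA_eq hrep, if_neg (by omega)]
      simp only [hget, hgetd]
      have hcast : ((l : Int) + 1) = ((l + 1 : Nat) : Int) := by push_cast; ring
      rw [hcast]
      exact ih (l + 1) _ hrep2 (by omega) (by omega)


lemma loopA_eq (n k : Int) (inp : String) (hpre : n ≤ PySem.Str.len inp) :
    ∀ (fuel r : Nat), r ≤ n.toNat → n.toNat - r ≤ fuel →
    ∀ (best : Int) (d : PySem.Dict Char Int),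
      DRep (winp (tOf n inp) (mA k (tOf n inp) r) r) d →
      solutionLoop n k inp (r : Int) ((mA k (tOf n inp) r : Nat) : Int) best d
        = winMax (fun j => mA k (tOf n inp) j) r n.toNat best := by
  intro fuel
  induction fuel with
  | zero =>
    intro r hr hfuel best d _hrep
    have hnot : ¬ ((r : Int) < n) := by omega
    rw [solutionLoop, dif_neg hnot, winMax_stop (by omega)]
  | succ fuel ih =>
    intro r hr hfuel best d hrep
    set t := tOf n inp with ht
    by_cases hlt : r < n.toNat
    · have hlen : t.length = n.toNat := length_tOf n inp hpre
      have hltn : (r : Int) < n := by omega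
      have hrlen : r < t.length := by omega
      have hget : PySem.Str.pyGet? inp (r : Int) = some (t[r]'hrlen) := by
        rw [pyGet?_tOf n inp hpre r hlt]
        exact List.getElem?_eq_getElem hrlen
      rw [solutionLoop, dif_pos hltn]
      simp only [hget]
      rw [count_update_eq]
      -- the pushed window is represented by the updated dict
      have hrep1 : DRep (winp t (mA k t r) (r + 1))
          (d.insert (t[r]'hrlen) (d.getD (t[r]'hrlen) 0 + 1)) := by
        have hp := DRep_push hrep (t[r]'hrlen)
        rwa [← winp_succ t (mA_le k t r) hrlen] at hp
      have hsum : (d.insert (t[r]'hrlen) (d.getD (t[r]'hrlen) 0 + 1)).values.sum.toNat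
          = (r + 1) - mA k t r := by
        rw [DRep_values_sum hrep1, length_winp t _ _ (by omega)]
        omega
      obtain ⟨d', hinner, hrep'⟩ := innerA_eq n k inp hpre (r + 1) (by omega)
        ((d.insert (t[r]'hrlen) (d.getD (t[r]'hrlen) 0 + 1)).values.sum.toNat)
        (mA k t r)
        (d.insert (t[r]'hrlen) (d.getD (t[r]'hrlen) 0 + 1))
        hrep1 (mA_mono k t r)
        (by simp only [← ht]; rw [hsum]; have := mA_le k t (r + 1); omega)
      simp only [← ht] at hinner hrep'
      simp only [hinner]
      have hbest : max best ((r : Int) - ((mA k t (r + 1) : Nat) : Int) + 1)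
          = max best (((r + 1 : Nat) : Int) - ((mA k t (r + 1) : Nat) : Int)) := by
        have : ((r : Int) - ((mA k t (r + 1) : Nat) : Int) + 1)
            = (((r + 1 : Nat) : Int) - ((mA k t (r + 1) : Nat) : Int)) := by push_cast; ring
        rw [this]
      have hcast : (r : Int) + 1 = ((r + 1 : Nat) : Int) := by push_cast; ring
      rw [hbest, hcast, ih (r + 1) (by omega) (by omega) _ d' hrep']
      rw [winMax_step hlt best]
      norm_cast
    · have hnot : ¬ ((r : Int) < n) := by omega
      rw [solutionLoop, dif_neg hnot, winMax_stop (by omega)]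

lemma solutionA_eq (n k : Int) (inp : String) (hpre : n ≤ PySem.Str.len inp) :
    solution n k inp = winMax (fun j => mA k (tOf n inp) j) 0 n.toNat 0 := by
  unfold solution
  have hrep : DRep (winp (tOf n inp) (mA k (tOf n inp) 0) 0) PySem.Dict.empty := by
    rw [mA_zero, winp_self]
    exact DRep_empty
  have h := loopA_eq n k inp hpre n.toNat 0 (by omega) (by omega) 0 PySem.Dict.empty hrep
  rw [mA_zero] at h
  simpa using h


-- ================== B: per-pair minimal starts and its window sweep ==================

def pairb (kk : Int) (a b : Char) (w : List Char) : Bool := decide ((othersN a b w : Int) ≤ kk)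

def mB (kk : Int) (a b : Char) (t : List Char) (r : Nat) : Nat := minStart (pairb kk a b) t r

lemma pairb_nil_true {kk : Int} (hkk : 0 ≤ kk) (a b : Char) : pairb kk a b [] = true := by
  simp [pairb, othersN, hkk]

lemma pairb_anti (kk : Int) (a b : Char) :
    ∀ w w', w.Sublist w' → pairb kk a b w' = true → pairb kk a b w = true := by
  intro w w' hs h
  simp only [pairb, decide_eq_true_eq] at h ⊢
  have := othersN_sublist a b hs
  omega

lemma mB_le (kk : Int) (a b : Char) (t : List Char) (r : Nat) : mB kk a b t r ≤ r :=
  minStart_le _ _ _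

lemma mB_mono (kk : Int) (a b : Char) (t : List Char) (r : Nat) :
    mB kk a b t r ≤ mB kk a b t (r + 1) := minStart_mono (pairb_anti kk a b) t r

lemma mB_zero (kk : Int) (a b : Char) (t : List Char) : mB kk a b t 0 = 0 :=
  Nat.le_zero.1 (mB_le kk a b t 0)

lemma pairb_iff {kk : Int} (hkk : 0 ≤ kk) (a b : Char) (t : List Char) (r l : Nat) :
    (othersN a b (winp t l r) : Int) ≤ kk ↔ mB kk a b t r ≤ l := by
  rw [show ((othersN a b (winp t l r) : Int) ≤ kk) ↔ (pairb kk a b (winp t l r) = true) by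
    simp [pairb]]
  exact p_iff_minStart_le (pairb_anti kk a b) (pairb_nil_true hkk a b)

lemma mA_le_mB (k : Int) (a b : Char) (t : List Char) (r : Nat) :
    mA k t r ≤ mB (max k 0) a b t r := by
  have hkk : (0 : Int) ≤ max k 0 := le_max_right k 0
  have hp := p_minStart (pairb_nil_true hkk a b) t r
  show minStart (goodb (max k 0)) t r ≤ mB (max k 0) a b t r
  rw [← mA]
  apply (mA_le_iff k t r _).1
  simp only [pairb, decide_eq_true_eq] at hp
  exact ⟨a, b, hp⟩

lemma winp_sublist_self (t : List Char) (l r : Nat) : (winp t l r).Sublist t :=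
  ((List.drop_sublist _ _).trans (List.take_sublist _ _))

lemma exists_pair_mB (k : Int) (t : List Char) (r : Nat) (ht : t ≠ []) :
    ∃ a ∈ PySem.List.dedup t, ∃ b ∈ PySem.List.dedup t,
      mB (max k 0) a b t r ≤ mA k t r := by
  have hkk : (0 : Int) ≤ max k 0 := le_max_right k 0
  have hg := p_minStart (goodb_nil_true k) t r
  cases hw : winp t (mA k t r) r with
  | nil =>
    obtain ⟨c, t', rfl⟩ : ∃ c t', t = c :: t' := by
      cases t with
      | nil => exact absurd rfl ht
      | cons c t' => exact ⟨c, t', rfl⟩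
    refine ⟨c, (PySem.List.mem_dedup _ _).2 List.mem_cons_self,
      c, (PySem.List.mem_dedup _ _).2 List.mem_cons_self, ?_⟩
    apply (pairb_iff hkk c c _ r _).1
    have hwA : winp (c :: t') (mA k (c :: t') r) r = [] := hw
    rw [hwA]
    simpa [othersN] using hkk
  | cons x w' =>
    have hgA : goodb (max k 0) (winp t (mA k t r) r) = true := hg
    have hwA : winp t (mA k t r) r = x :: w' := hw
    rw [hwA] at hgA
    simp only [goodb, List.any_eq_true, decide_eq_true_eq] at hgA
    obtain ⟨a, ha, b, hb, hab⟩ := hgA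
    have hsub : ∀ c, c ∈ PySem.List.dedup (x :: w') → c ∈ PySem.List.dedup t := by
      intro c hc
      have h1 := (PySem.List.mem_dedup _ _).1 hc
      have h2 : c ∈ winp t (mA k t r) r := by rw [hwA]; exact h1
      exact (PySem.List.mem_dedup _ _).2 ((winp_sublist_self t _ r).mem h2)
    refine ⟨a, hsub a ha, b, hsub b hb, ?_⟩
    apply (pairb_iff hkk a b _ r _).1
    rw [hwA]
    exact hab

lemma othersN_append_singleton (a b c : Char) (w : List Char) :
    othersN a b (w ++ [c]) = othersN a b w + (if c = a ∨ c = b then 0 else 1) := by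
  unfold othersN
  rw [List.countP_append]
  congr 1
  have := othersN_cons a b c []
  simpa [othersN] using this

lemma ifmax (x y : Int) : (if x < y then y else x) = max x y := by
  by_cases h : x < y
  · rw [if_pos h, max_eq_right (le_of_lt h)]
  · rw [if_neg h, max_eq_left (by omega)]

lemma sOf_eq (n : Int) (inp : String) :
    (if 0 < n then PySem.List.slice inp.toList none (some n) else []) = tOf n inp := by
  by_cases h : 0 < n
  · rw [if_pos h, PySem.List.slice_to _ (le_of_lt h)]
    rfl
  · rw [if_neg h]
    unfold tOf
    have h0 : n.toNat = 0 := by omega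
    rw [h0]
    rfl

lemma kkOf_eq (k : Int) : (if 0 < k then k else 0) = max k 0 := by
  split_ifs with h
  · exact (max_eq_left (by omega)).symm
  · exact (max_eq_right (by omega)).symm

lemma bShrink_eq (kk : Int) (hkk : 0 ≤ kk) (t : List Char) (a b : Char) (r1 : Nat)
    (hr1 : r1 ≤ t.length) :
    ∀ (fuel l : Nat), l ≤ mB kk a b t r1 → mB kk a b t r1 ≤ l + fuel →
      bShrink kk t a b fuel (l : Int) ((othersN a b (winp t l r1) : Nat) : Int)
        = (((mB kk a b t r1 : Nat) : Int),
           ((othersN a b (winp t (mB kk a b t r1) r1) : Nat) : Int)) := by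
  intro fuel
  induction fuel with
  | zero =>
    intro l hle hfuel
    have hl : l = mB kk a b t r1 := by omega
    subst hl
    rfl
  | succ fuel ih =>
    intro l hle hfuel
    by_cases hstop : mB kk a b t r1 ≤ l
    · have hok : (othersN a b (winp t (mB kk a b t r1) r1) : Int) ≤ kk :=
        (pairb_iff hkk a b t r1 _).2 le_rfl
      have hl : l = mB kk a b t r1 := by omega
      subst hl
      rw [bShrink, if_neg (by omega)]
    · have hlt : l < mB kk a b t r1 := by omega
      have hgt : kk < (othersN a b (winp t l r1) : Int) := by
        by_contra hc
        exact hstop ((pairb_iff hkk a b t r1 l).1 (by omega))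
      have hltr : l < r1 := by
        have := mB_le kk a b t r1
        omega
      have hlt_len : l < t.length := by omega
      have hget : PySem.List.pyGet? t (l : Int) = some (t[l]'hlt_len) := by
        rw [PySem.List.pyGet?_natCast]
        exact List.getElem?_eq_getElem hlt_len
      have hwin : winp t l r1 = t[l]'hlt_len :: winp t (l + 1) r1 := winp_cons t hltr hlt_len
      rw [bShrink, if_pos hgt]
      simp only [hget]
      have hcast : ((l : Int) + 1) = ((l + 1 : Nat) : Int) := by push_cast; ring
      have hupd : (if t[l]'hlt_len ≠ a ∧ t[l]'hlt_len ≠ b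
            then ((othersN a b (winp t l r1) : Nat) : Int) - 1
            else ((othersN a b (winp t l r1) : Nat) : Int))
          = ((othersN a b (winp t (l + 1) r1) : Nat) : Int) := by
        rw [hwin, othersN_cons]
        by_cases hc : t[l]'hlt_len = a ∨ t[l]'hlt_len = b
        · rw [if_neg (by tauto), if_pos hc]
          push_cast
          ring
        · rw [if_pos (by tauto), if_neg hc]
          push_cast
          ring
      rw [hupd, hcast]
      exact ih (l + 1) (by omega) (by omega)

lemma bLoop_eq (kk : Int) (hkk : 0 ≤ kk) (t : List Char) (a b : Char) :
    ∀ (cnt r : Nat), r ≤ t.length → t.length - r ≤ cnt → ∀ (best : Int),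
      (PySem.List.pyRange (r : Int) ((t.length : Nat) : Int) 1).foldl (bStep kk t a b)
        (((mB kk a b t r : Nat) : Int),
         ((othersN a b (winp t (mB kk a b t r) r) : Nat) : Int), best)
      = (((mB kk a b t t.length : Nat) : Int),
         ((othersN a b (winp t (mB kk a b t t.length) t.length) : Nat) : Int),
         winMax (fun j => mB kk a b t j) r t.length best) := by
  intro cnt
  induction cnt with
  | zero =>
    intro r hr hfuel best
    have hr' : r = t.length := by omega
    subst hr'
    rw [PySem.List.pyRange_one_eq_nil (by omega), winMax_stop (by omega)]
    rfl
  | succ cnt ih =>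
    intro r hr hfuel best
    by_cases hlt : r < t.length
    · rw [PySem.List.pyRange_one_cons (by exact_mod_cast hlt)]
      rw [List.foldl_cons]
      have hget : PySem.List.pyGet? t (r : Int) = some (t[r]'hlt) := by
        rw [PySem.List.pyGet?_natCast]
        exact List.getElem?_eq_getElem hlt
      have hwsucc : winp t (mB kk a b t r) (r + 1)
          = winp t (mB kk a b t r) r ++ [t[r]'hlt] :=
        winp_succ t (mB_le kk a b t r) hlt
      have hupd : (if t[r]'hlt ≠ a ∧ t[r]'hlt ≠ b
            then ((othersN a b (winp t (mB kk a b t r) r) : Nat) : Int) + 1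
            else ((othersN a b (winp t (mB kk a b t r) r) : Nat) : Int))
          = ((othersN a b (winp t (mB kk a b t r) (r + 1)) : Nat) : Int) := by
        rw [hwsucc, othersN_append_singleton]
        by_cases hc : t[r]'hlt = a ∨ t[r]'hlt = b
        · rw [if_neg (by tauto), if_pos hc]
          push_cast
          ring
        · rw [if_pos (by tauto), if_neg hc]
          push_cast
          ring
      have hshr := bShrink_eq kk hkk t a b (r + 1) (by omega) t.length (mB kk a b t r)
        (mB_mono kk a b t r)
        (by have h1 := mB_le kk a b t (r + 1); omega)
      simp only [bStep, hget, hupd, hshr]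
      have hbest : (if best < (r : Int) - ((mB kk a b t (r + 1) : Nat) : Int) + 1
            then (r : Int) - ((mB kk a b t (r + 1) : Nat) : Int) + 1 else best)
          = max best (((r + 1 : Nat) : Int) - ((mB kk a b t (r + 1) : Nat) : Int)) := by
        rw [ifmax]
        congr 1
        push_cast
        ring
      have hcast : (r : Int) + 1 = ((r + 1 : Nat) : Int) := by push_cast; ring
      rw [hbest, hcast, ih (r + 1) (by omega) (by omega) _]
      rw [winMax_step hlt best]
      norm_cast
    · have hr' : r = t.length := by omega
      subst hr'
      rw [PySem.List.pyRange_one_eq_nil (by omega), winMax_stop (by omega)]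
      rfl

lemma bPair_eq (kk : Int) (hkk : 0 ≤ kk) (t : List Char) (a b : Char) (best : Int) :
    bPair kk t a b best = winMax (fun j => mB kk a b t j) 0 t.length best := by
  unfold bPair
  have h := bLoop_eq kk hkk t a b t.length 0 (by omega) (by omega) best
  rw [mB_zero, winp_self] at h
  have h0 : (othersN a b ([] : List Char)) = 0 := by simp [othersN]
  rw [h0] at h
  simp only [Nat.cast_zero] at h
  rw [h]

-- ================== generic bounds for the nested running-max folds ==================

lemma foldl_ge_init {α : Type} (g : Int → α → Int) (hmono : ∀ acc x, acc ≤ g acc x) :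
    ∀ (l : List α) (init : Int), init ≤ l.foldl g init := by
  intro l
  induction l with
  | nil => intro init; simp
  | cons x xs ih =>
    intro init
    exact le_trans (hmono init x) (ih (g init x))

lemma foldl_attains {α : Type} (g : Int → α → Int) (hmono : ∀ acc x, acc ≤ g acc x)
    {x : α} (C : Int) (hC : ∀ acc, C ≤ g acc x) :
    ∀ (l : List α), x ∈ l → ∀ init, C ≤ l.foldl g init := by
  intro l
  induction l with
  | nil => intro hx; cases hx
  | cons y ys ih =>
    intro hx init
    rcases List.mem_cons.1 hx with rfl | hx'
    · exact le_trans (hC init) (foldl_ge_init g hmono ys _)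
    · exact ih hx' (g init y)

lemma foldl_bounded {α : Type} (g : Int → α → Int) (C : Int) :
    ∀ (l : List α), (∀ acc x, x ∈ l → acc ≤ C → g acc x ≤ C) →
      ∀ init, init ≤ C → l.foldl g init ≤ C := by
  intro l
  induction l with
  | nil => intro _ init h; simpa using h
  | cons y ys ih =>
    intro hstep init hinit
    exact ih (fun acc x hx h => hstep acc x (List.mem_cons_of_mem _ hx) h) _
      (hstep init y List.mem_cons_self hinit)

lemma winMax_ge_init (f : Nat → Nat) (r stop : Nat) (acc : Int) : acc ≤ winMax f r stop acc :=
  foldl_ge_init _ (fun acc j => le_max_left _ _) _ acc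

lemma winMax_ge_elem (f : Nat → Nat) (r stop : Nat) (acc : Int) {j : Nat}
    (hj1 : r < j) (hj2 : j ≤ stop) : (j : Int) - (f j : Int) ≤ winMax f r stop acc := by
  unfold winMax
  have hmem : j ∈ List.range' (r + 1) (stop - r) := List.mem_range'_1.2 ⟨by omega, by omega⟩
  exact foldl_attains (fun (a : Int) (j : Nat) => max a ((j : Int) - (f j : Int)))
    (fun acc x => le_max_left _ _) ((j : Int) - (f j : Int)) (fun acc => le_max_right _ _) _
    hmem acc

lemma winMax_le (f : Nat → Nat) (r stop : Nat) (acc : Int) (C : Int) (hacc : acc ≤ C)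
    (h : ∀ j : Nat, r < j → j ≤ stop → (j : Int) - (f j : Int) ≤ C) :
    winMax f r stop acc ≤ C := by
  unfold winMax
  apply foldl_bounded _ C _ ?_ _ hacc
  intro acc' j hj hacc'
  have hj' := List.mem_range'_1.1 hj
  exact max_le hacc' (h j (by omega) (by omega))


lemma solution_eq_alt (n k : Int) (inp : String) (hpre : n ≤ PySem.Str.len inp) :
    solution n k inp = solution_alt n k inp := by
  have hkk : (0 : Int) ≤ max k 0 := le_max_right k 0
  have hN : (tOf n inp).length = n.toNat := length_tOf n inp hpre
  rw [solutionA_eq n k inp hpre]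
  unfold solution_alt
  simp only [sOf_eq, kkOf_eq]
  -- abbreviations
  have hmono1 : ∀ (acc : Int) (a b : Char), acc ≤ bPair (max k 0) (tOf n inp) a b acc := by
    intro acc a b
    rw [bPair_eq _ hkk]
    exact winMax_ge_init _ 0 _ acc
  have hmono2 : ∀ (acc : Int) (a : Char),
      acc ≤ (PySem.List.dedup (tOf n inp)).foldl
        (fun best b => bPair (max k 0) (tOf n inp) a b best) acc := by
    intro acc a
    exact foldl_ge_init _ (fun acc b => hmono1 acc a b) _ acc
  apply le_antisymm
  · -- A's maximum is attained by some kept pair in B's enumeration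
    apply winMax_le _ 0 n.toNat 0 _ ?_ ?_
    · exact foldl_ge_init _ (fun acc a => hmono2 acc a) _ 0
    · intro j hj1 hj2
      have htne : tOf n inp ≠ [] := List.ne_nil_of_length_pos (by omega)
      obtain ⟨a, ha, b, hb, hple⟩ := exists_pair_mB k (tOf n inp) j htne
      have hCb : ∀ acc : Int, (j : Int) - (mA k (tOf n inp) j : Int)
          ≤ bPair (max k 0) (tOf n inp) a b acc := by
        intro acc
        rw [bPair_eq _ hkk]
        have h1 := winMax_ge_elem (fun j' => mB (max k 0) a b (tOf n inp) j')
          0 (tOf n inp).length acc (j := j) (by omega) (by omega)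
        simp only at h1
        have h2 : (mB (max k 0) a b (tOf n inp) j : Int) ≤ (mA k (tOf n inp) j : Int) := by
          exact_mod_cast hple
        omega
      have hCinner : ∀ acc : Int, (j : Int) - (mA k (tOf n inp) j : Int)
          ≤ (PySem.List.dedup (tOf n inp)).foldl
            (fun best b' => bPair (max k 0) (tOf n inp) a b' best) acc := by
        intro acc
        exact foldl_attains _ (fun acc x => hmono1 acc a x) _ hCb _ hb acc
      exact foldl_attains _ (fun acc x => hmono2 acc x) _ hCinner _ ha 0
  · -- every pair window B tries is no longer than A's optimum
    apply foldl_bounded _ _ _ ?_ _ (winMax_ge_init _ 0 n.toNat 0)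
    intro acc a _ hacc
    apply foldl_bounded _ _ _ ?_ _ hacc
    intro acc' b _ hacc'
    rw [bPair_eq _ hkk]
    apply winMax_le _ 0 _ _ _ hacc'
    intro j hj1 hj2
    have h1 := winMax_ge_elem (fun j' => mA k (tOf n inp) j') 0 n.toNat 0
      (j := j) (by omega) (by omega)
    simp only at h1
    have h2 : (mA k (tOf n inp) j : Int) ≤ (mB (max k 0) a b (tOf n inp) j : Int) := by
      exact_mod_cast mA_le_mB k a b (tOf n inp) j
    omega

-- ===== VERDICT (by name: the statement is the Claim_ definition above) =====
theorem solution_spec : Claim_equal_solution := by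
  intro n k inp _hdom hpre
  unfold Spec_solution
  exact solution_eq_alt n k inp hpre
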